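-- pv_equiv track=rewrite | github.com/SyFi/sqlipwn | sqlipwn.py | _extract_error_context
-- ===== SOURCE A (Python) =====
-- def _extract_error_context(response_text: str, error_match: str) -> str:
--
--     try:
--         # Find the line containing the error
--         lines = response_text.split('\n')
--         error_line = None
--
--         for line in lines:
--             if error_match.lower() in line.lower():
--                 error_line = line.strip()
--                 break
--
--         if error_line:
--             # Truncate very long lines
--             if len(error_line) > 200:
--                 error_line = error_line[:200] + "..."
--             return f"Database error detected: {error_line}"
--         else:
--             return f"Database error pattern matched: {error_match}"
--
--     except Exception:
--         return f"Database error detected: {error_match}"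
-- ===== SOURCE B (Python) =====
-- def _line_at(text: str, idx: int) -> str:
--     start = text.rfind('\n', 0, idx) + 1
--     end = text.find('\n', idx)
--     if end == -1:
--         end = len(text)
--     return text[start:end]
--
--
-- def _extract_error_context(response_text: str, error_match: str) -> str:
--     try:
--         idx = response_text.lower().find(error_match.lower())
--         if '\n' in error_match or idx == -1:
--             return f"Database error pattern matched: {error_match}"
--         error_line = _line_at(response_text, idx).strip()
--         if not error_line:
--             return f"Database error pattern matched: {error_match}"
--         if len(error_line) > 200:
--             error_line = error_line[:200] + "..."
--         return f"Database error detected: {error_line}"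
--     except Exception:
--         return f"Database error detected: {error_match}"
-- ===== Notes on version B (the rewrite author's own statement) =====
-- stated objective: alternative
-- what changed: B replaces A's split-into-lines-and-linear-scan by a single substring search on the lowercased whole text, then recovers the enclosing line's boundaries with rfind/find of the newline character (with an explicit newline-in-pattern guard, since a pattern containing a newline can never match inside one line).
import Mathlib
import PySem

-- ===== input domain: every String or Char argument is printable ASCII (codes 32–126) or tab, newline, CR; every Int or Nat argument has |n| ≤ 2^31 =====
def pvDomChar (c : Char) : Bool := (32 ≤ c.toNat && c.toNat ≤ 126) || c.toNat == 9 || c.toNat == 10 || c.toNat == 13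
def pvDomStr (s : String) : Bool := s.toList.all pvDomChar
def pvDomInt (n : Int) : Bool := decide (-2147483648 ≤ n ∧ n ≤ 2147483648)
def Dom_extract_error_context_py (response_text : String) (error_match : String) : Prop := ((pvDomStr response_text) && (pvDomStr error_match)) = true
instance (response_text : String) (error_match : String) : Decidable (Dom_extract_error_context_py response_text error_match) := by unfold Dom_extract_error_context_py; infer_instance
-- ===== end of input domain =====

-- B replaces A's split-into-lines-and-scan by one substring search on the lowercased whole
-- text plus rfind/find of '\n' for the enclosing line's boundaries (objective: alternative).

-- ===== PORT A =====
-- A's loop over the lines: the first line whose lowercase contains m ('error_line = line.strip(); break')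
def pvFirstLine (m : List Char) : List (List Char) → Option (List Char)
  | [] => none
  | l :: ls =>
      if PySem.Chars.isIn m (PySem.Chars.lower l) then some (PySem.Chars.strip l)
      else pvFirstLine m ls

def extract_error_context_py (response_text : String) (error_match : String) : String :=
  let lines := PySem.Chars.splitOn response_text.toList ['\n']
  match pvFirstLine (PySem.Chars.lower error_match.toList) lines with
  | some el =>
      if el ≠ [] then
        let el := if 200 < (el.length : Int) then PySem.Chars.slice el none (some 200) ++ "...".toList else el
        "Database error detected: " ++ String.ofList el
      else "Database error pattern matched: " ++ error_match
  | none => "Database error pattern matched: " ++ error_match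

-- ===== PORT B =====
-- Source B's helper _line_at: boundaries of the line around index idx, via rfind/find of '\n'
def pvLineAt (t : List Char) (idx : Int) : List Char :=
  let start := PySem.Chars.rfindFrom t ['\n'] 0 (some idx) + 1
  let stop := PySem.Chars.findFrom t ['\n'] idx
  let stop := if stop = -1 then (t.length : Int) else stop
  PySem.Chars.slice t (some start) (some stop)

def extract_error_context_py_alt (response_text : String) (error_match : String) : String :=
  let t := response_text.toList
  let idx := PySem.Chars.find (PySem.Chars.lower t) (PySem.Chars.lower error_match.toList)
  if '\n' ∈ error_match.toList ∨ idx = -1 then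
    "Database error pattern matched: " ++ error_match
  else
    let el := PySem.Chars.strip (pvLineAt t idx)
    if el = [] then "Database error pattern matched: " ++ error_match
    else
      let el := if 200 < (el.length : Int) then PySem.Chars.slice el none (some 200) ++ "...".toList else el
      "Database error detected: " ++ String.ofList el

-- ===== PRECONDITION & SPEC =====
def Spec_extract_error_context_py (response_text : String) (error_match : String) (out : String) : Prop := out = extract_error_context_py_alt response_text error_match
instance (response_text : String) (error_match : String) (out : String) : Decidable (Spec_extract_error_context_py response_text error_match out) := by unfold Spec_extract_error_context_py; infer_instance

-- ===== CLAIM (what is proved, stated in full; the proofs are below) =====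
def Claim_equal_extract_error_context_py : Prop := ∀ (response_text : String) (error_match : String), Dom_extract_error_context_py response_text error_match → Spec_extract_error_context_py response_text error_match (extract_error_context_py response_text error_match)

-- ===== LEMMAS AND PROOFS =====

theorem pv_lowerChar_newline (c : Char) : PySem.Chars.lowerChar c = '\n' ↔ c = '\n' := by
  unfold PySem.Chars.lowerChar PySem.Chars.isupper
  split
  · rename_i h
    simp only [Bool.and_eq_true, decide_eq_true_eq, Char.le_def] at h
    have h65 : 65 ≤ c.toNat := by
      have := UInt32.le_iff_toNat_le.mp h.1; rw [Char.toNat_val] at this; exact this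
    have h90 : c.toNat ≤ 90 := by
      have := UInt32.le_iff_toNat_le.mp h.2; rw [Char.toNat_val] at this; exact this
    have hv : (c.toNat + 32).isValidChar := by
      unfold Nat.isValidChar; left; omega
    constructor
    · intro he
      have h2 := congrArg Char.toNat he
      rw [Char.toNat_ofNat, if_pos hv] at h2
      have : ('\n').toNat = 10 := by decide
      omega
    · intro h'
      exfalso; subst h'
      have : ('\n').toNat = 10 := by decide
      omega
  · simp

theorem pv_mem_lower_newline (s : List Char) : '\n' ∈ PySem.Chars.lower s ↔ '\n' ∈ s := by
  unfold PySem.Chars.lower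
  simp only [List.mem_map]
  constructor
  · rintro ⟨c, hc, he⟩; rwa [(pv_lowerChar_newline c).mp he] at hc
  · intro h; exact ⟨'\n', h, (pv_lowerChar_newline '\n').mpr rfl⟩

theorem pv_length_lower (s : List Char) : (PySem.Chars.lower s).length = s.length := by
  unfold PySem.Chars.lower; simp

-- find: shift of the counter
theorem pv_find_go_shift (sub : List Char) : ∀ (l : List Char) (k : Nat),
    PySem.Chars.find.go sub l k =
      if PySem.Chars.find.go sub l 0 = -1 then -1 else PySem.Chars.find.go sub l 0 + k := by
  intro l
  induction l with
  | nil => intro k; simp only [PySem.Chars.find.go]; split <;> simp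
  | cons c t ih =>
      intro k
      rw [PySem.Chars.find.go, PySem.Chars.find.go]
      by_cases hp : sub.isPrefixOf (c :: t) = true
      · simp [hp]
      · simp only [hp]
        rw [ih (k+1), ih 1]
        by_cases h0 : PySem.Chars.find.go sub t 0 = -1
        · simp [h0]
        · have h1 : ¬ (PySem.Chars.find.go sub t 0 + ((1:Nat):Int) = -1) := by
            have := PySem.Chars.neg_one_le_find (s := t) (sub := sub)
            unfold PySem.Chars.find at this
            push_cast
            omega
          simp only [h0]
          push_cast
          omega

theorem pv_find_cons (sub : List Char) (c : Char) (t : List Char) :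
    PySem.Chars.find (c :: t) sub =
      if sub.isPrefixOf (c :: t) then 0
      else if PySem.Chars.find t sub = -1 then -1 else PySem.Chars.find t sub + 1 := by
  unfold PySem.Chars.find
  rw [PySem.Chars.find.go]
  by_cases hp : sub.isPrefixOf (c :: t) = true
  · simp [hp]
  · simp only [hp]
    rw [pv_find_go_shift]
    norm_num

theorem pv_find_nonneg_le (s sub : List Char) (h : PySem.Chars.find s sub ≠ -1) :
    0 ≤ PySem.Chars.find s sub ∧ (PySem.Chars.find s sub).toNat + sub.length ≤ s.length := by
  have h0 : 0 ≤ PySem.Chars.find s sub := by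
    have := PySem.Chars.neg_one_le_find (s := s) (sub := sub); omega
  refine ⟨h0, ?_⟩
  have := (PySem.Chars.find_spec (s := s) (sub := sub) h0).1
  have hl := this.length_le
  simp [List.length_drop] at hl
  have := PySem.Chars.find_le_length (s := s) (sub := sub)
  omega

-- first occurrence inside a prefix part: find (x ++ y) m = find x m when m occurs in x
theorem pv_find_append_left (m : List Char) : ∀ (x y : List Char), m <:+: x →
    PySem.Chars.find (x ++ y) m = PySem.Chars.find x m := by
  intro x
  induction x with
  | nil =>
      intro y hm
      have : m = [] := List.eq_nil_of_infix_nil hm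
      subst this
      simp [PySem.Chars.find_nil]
  | cons c x' ih =>
      intro y hm
      rw [List.cons_append, pv_find_cons, pv_find_cons]
      by_cases hp : m.isPrefixOf (c :: x') = true
      · have : m.isPrefixOf (c :: (x' ++ y)) = true := by
          rw [List.isPrefixOf_iff_prefix] at hp ⊢
          exact hp.trans (List.prefix_append _ _)
        rw [if_pos this, if_pos hp]
      · have hnp : ¬ m.isPrefixOf (c :: (x' ++ y)) = true := by
          intro hc
          apply hp
          rw [List.isPrefixOf_iff_prefix] at hc ⊢
          have hlen : m.length ≤ (c :: x').length := hm.length_le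
          rw [List.prefix_iff_eq_take] at hc ⊢
          rw [← List.cons_append] at hc
          rwa [List.take_append_of_le_length hlen] at hc
        have hm' : m <:+: x' := by
          rcases List.infix_cons_iff.mp hm with h | h
          · exact absurd (List.isPrefixOf_iff_prefix.mpr h) hp
          · exact h
        rw [if_neg hp, if_neg hnp, ih y hm']

theorem pv_find_no_newline (x : List Char) (hx : '\n' ∉ x) :
    PySem.Chars.find x ['\n'] = -1 := by
  rw [PySem.Chars.find_eq_neg_one_iff]
  rw [List.singleton_infix_iff]
  exact hx

-- first '\n' of x ++ '\n' :: y when x is newline-free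
theorem pv_find_newline_append : ∀ (x y : List Char), '\n' ∉ x →
    PySem.Chars.find (x ++ '\n' :: y) ['\n'] = (x.length : Int) := by
  intro x
  induction x with
  | nil =>
      intro y _
      rw [List.nil_append, pv_find_cons]
      simp
  | cons c x' ih =>
      intro y hx
      have hc : c ≠ '\n' := by intro h; exact hx (by simp [h])
      have hx' : '\n' ∉ x' := fun h => hx (List.mem_cons_of_mem _ h)
      rw [List.cons_append, pv_find_cons]
      have hp : ¬ (['\n'].isPrefixOf (c :: (x' ++ '\n' :: y)) = true) := by
        rw [List.isPrefixOf_iff_prefix]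
        intro h
        rcases h with ⟨t, ht⟩
        simp at ht
        exact hc ht.1.symm
      rw [if_neg hp, ih y hx']
      have : ((x'.length : Int)) ≠ -1 := by omega
      rw [if_neg this]
      simp

-- no occurrence in newline-free x, m newline-free nonempty: occurrences only after the separator
theorem pv_find_append_sep (m : List Char) (hm : '\n' ∉ m) (hne : m ≠ []) :
    ∀ (x y : List Char), ¬ (m <:+: x) →
    PySem.Chars.find (x ++ '\n' :: y) m =
      if PySem.Chars.find y m = -1 then -1 else (x.length : Int) + 1 + PySem.Chars.find y m := by
  intro x
  induction x with
  | nil =>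
      intro y _
      rw [List.nil_append, pv_find_cons]
      have hp : ¬ (m.isPrefixOf ('\n' :: y) = true) := by
        rw [List.isPrefixOf_iff_prefix]
        intro h
        rcases m with _ | ⟨c, m'⟩
        · exact hne rfl
        · rcases h with ⟨t, ht⟩
          simp at ht
          exact hm (by simp [ht.1])
      rw [if_neg hp]
      split
      · simp
      · simp
        omega
  | cons c x' ih =>
      intro y hx
      have hpre : ¬ (m <+: (c :: x')) := fun h => hx (List.infix_cons_iff.mpr (Or.inl h))
      have hinf : ¬ (m <:+: x') := fun h => hx (List.infix_cons_iff.mpr (Or.inr h))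
      rw [List.cons_append, pv_find_cons]
      have hp : ¬ (m.isPrefixOf (c :: (x' ++ '\n' :: y)) = true) := by
        rw [List.isPrefixOf_iff_prefix]
        intro h
        by_cases hlen : m.length ≤ (c :: x').length
        · apply hpre
          rw [List.prefix_iff_eq_take] at h ⊢
          rw [← List.cons_append, List.take_append_of_le_length hlen] at h
          exact h
        · -- m reaches past x', so it contains the '\n' at position (c::x').length
          apply hm
          have hlt : (c :: x').length < m.length := by omega
          have hmem := h.getElem (i := (c :: x').length) hlt
          have hg : (c :: (x' ++ '\n' :: y))[(c :: x').length]'(by simp) = '\n' := by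
            have h1 : (c :: (x' ++ '\n' :: y))[(c :: x').length]'(by simp)
                = (x' ++ '\n' :: y)[x'.length]'(by simp) := by
              simp
            rw [h1, List.getElem_append_right (le_refl _)]
            simp
          have hfin : m[(c :: x').length]'hlt = '\n' := hmem.trans hg
          exact hfin ▸ List.getElem_mem _
      rw [if_neg hp, ih y hinf]
      by_cases hy : PySem.Chars.find y m = -1
      · simp [hy]
      · have h0 : 0 ≤ PySem.Chars.find y m := (pv_find_nonneg_le y m hy).1
        have hne2 : ¬ ((x'.length : Int) + 1 + PySem.Chars.find y m = -1) := by omega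
        rw [if_neg hy, if_neg hne2, if_neg hy]
        simp
        omega

theorem pv_rfind_go_spec (s sub : List Char) : ∀ n : Nat,
    (PySem.Chars.rfind.go s sub n = -1 ∧ ∀ j : Nat, j ≤ n → ¬ sub <+: s.drop j) ∨
    (∃ j : Nat, j ≤ n ∧ PySem.Chars.rfind.go s sub n = (j : Int) ∧ sub <+: s.drop j ∧
      ∀ i : Nat, j < i → i ≤ n → ¬ sub <+: s.drop i) := by
  intro n
  induction n with
  | zero =>
      rw [PySem.Chars.rfind.go]
      by_cases hp : sub.isPrefixOf s = true
      · right
        refine ⟨0, le_refl _, by simp [hp], ?_, by omega⟩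
        simpa [List.isPrefixOf_iff_prefix] using hp
      · left
        refine ⟨by simp [hp], ?_⟩
        intro j hj
        interval_cases j
        simpa [List.isPrefixOf_iff_prefix] using hp
  | succ j ihn =>
      rw [PySem.Chars.rfind.go]
      by_cases hp : sub.isPrefixOf (List.drop (j + 1) s) = true
      · right
        refine ⟨j + 1, le_refl _, by simp [hp], ?_, by omega⟩
        simpa [List.isPrefixOf_iff_prefix] using hp
      · rw [if_neg hp]
        rcases ihn with ⟨h1, h2⟩ | ⟨j0, hj0, heq, hocc, hmax⟩
        · left
          refine ⟨h1, ?_⟩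
          intro i hi
          rcases Nat.lt_or_ge i (j + 1) with h | h
          · exact h2 i (by omega)
          · have : i = j + 1 := by omega
            subst this
            simpa [List.isPrefixOf_iff_prefix] using hp
        · right
          refine ⟨j0, by omega, heq, hocc, ?_⟩
          intro i hi1 hi2
          rcases Nat.lt_or_ge i (j + 1) with h | h
          · exact hmax i hi1 (by omega)
          · have : i = j + 1 := by omega
            subst this
            simpa [List.isPrefixOf_iff_prefix] using hp

theorem pv_rfind_eq_neg_one (s sub : List Char)
    (h : ∀ j : Nat, j ≤ s.length → ¬ sub <+: s.drop j) :
    PySem.Chars.rfind s sub = -1 := by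
  unfold PySem.Chars.rfind
  rcases pv_rfind_go_spec s sub s.length with ⟨h1, _⟩ | ⟨j, hj, heq, hocc, _⟩
  · exact h1
  · exact absurd hocc (h j hj)

theorem pv_rfind_eq_of (s sub : List Char) (e : Nat) (he : e ≤ s.length)
    (h1 : sub <+: s.drop e) (h2 : ∀ i : Nat, e < i → i ≤ s.length → ¬ sub <+: s.drop i) :
    PySem.Chars.rfind s sub = (e : Int) := by
  unfold PySem.Chars.rfind
  rcases pv_rfind_go_spec s sub s.length with ⟨_, hno⟩ | ⟨j, hj, heq, hocc, hmax⟩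
  · exact absurd h1 (hno e he)
  · rw [heq]
    congr 1
    rcases Nat.lt_trichotomy j e with h | h | h
    · exact absurd h1 (hmax e h he)
    · omega
    · exact absurd hocc (h2 j h hj)

theorem pv_rfind_no_newline (s : List Char) (hs : '\n' ∉ s) :
    PySem.Chars.rfind s ['\n'] = -1 := by
  apply pv_rfind_eq_neg_one
  intro j _ h
  have : '\n' ∈ s.drop j := h.mem (by simp)
  exact hs (List.mem_of_mem_drop this)

theorem pv_rfind_newline_append (a r : List Char) :
    PySem.Chars.rfind (a ++ '\n' :: r) ['\n'] =
      if PySem.Chars.rfind r ['\n'] = -1 then (a.length : Int)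
      else (a.length : Int) + 1 + PySem.Chars.rfind r ['\n'] := by
  have hdrop : ∀ i : Nat, a.length < i → (a ++ '\n' :: r).drop i = r.drop (i - a.length - 1) := by
    intro i hi
    rw [List.drop_append, List.drop_eq_nil_of_le (by omega), List.nil_append]
    rw [show i - a.length = (i - a.length - 1) + 1 by omega]
    rw [List.drop_succ_cons]
    congr 1
  by_cases h : PySem.Chars.rfind r ['\n'] = -1
  · rw [if_pos h]
    apply pv_rfind_eq_of
    · simp
    · rw [List.drop_append, List.drop_eq_nil_of_le (le_refl _), List.nil_append, Nat.sub_self, List.drop_zero]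
      simp
    · intro i hi1 hi2
      rw [hdrop i hi1]
      intro hocc
      -- occurrence of '\n' in r.drop _, contradicting rfind r = -1
      have hno : ∀ j : Nat, j ≤ r.length → ¬ ['\n'] <+: r.drop j := by
        rcases pv_rfind_go_spec r ['\n'] r.length with ⟨_, h2⟩ | ⟨j, hj, heq, _, _⟩
        · exact h2
        · exfalso
          unfold PySem.Chars.rfind at h
          rw [heq] at h
          omega
      by_cases hle : i - a.length - 1 ≤ r.length
      · exact hno _ hle hocc
      · rw [List.drop_eq_nil_of_le (by omega)] at hocc
        simpa using hocc.length_le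
  · rw [if_neg h]
    rcases pv_rfind_go_spec r ['\n'] r.length with ⟨h1, _⟩ | ⟨j, hj, heq, hocc, hmax⟩
    · exact absurd h1 h
    · unfold PySem.Chars.rfind at h ⊢
      rw [heq]
      have : (a.length : Int) + 1 + (j : Int) = ((a.length + 1 + j : Nat) : Int) := by push_cast; ring
      rw [this]
      apply pv_rfind_eq_of
      · simp; omega
      · rw [hdrop _ (by omega)]
        rw [show a.length + 1 + j - a.length - 1 = j by omega]
        exact hocc
      · intro i hi1 hi2
        rw [hdrop i (by omega)]
        intro hocc2
        by_cases hle : i - a.length - 1 ≤ r.length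
        · exact hmax _ (by omega) hle hocc2
        · rw [List.drop_eq_nil_of_le (by omega)] at hocc2
          simpa using hocc2.length_le

theorem pv_rfindFrom_zero_some (t sub : List Char) (k : Int) (h0 : 0 ≤ k) (hk : k ≤ (t.length : Int)) :
    PySem.Chars.rfindFrom t sub 0 (some k) = PySem.Chars.rfind (t.take k.toNat) sub := by
  unfold PySem.Chars.rfindFrom
  dsimp only
  rw [if_neg (by omega : ¬ ((t.length : Int) < k))]
  rw [if_neg (by omega : ¬ (k < 0))]
  rw [if_neg (by omega : ¬ ((0:Int) < 0))]
  rw [if_neg (by omega : ¬ (k < (0:Int)))]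
  rw [show ((0:Int)).toNat = 0 from rfl, List.drop_zero]
  by_cases hr : PySem.Chars.rfind (t.take k.toNat) sub = -1
  · rw [if_pos hr, hr]
  · rw [if_neg hr]; omega

theorem pv_findFrom_nonneg (t sub : List Char) (k : Int) (h0 : 0 ≤ k) (hk : k ≤ (t.length : Int)) :
    PySem.Chars.findFrom t sub k none =
      if PySem.Chars.find (t.drop k.toNat) sub = -1 then -1
      else k + PySem.Chars.find (t.drop k.toNat) sub := by
  have := PySem.Chars.findFrom_natCast t sub k.toNat (by omega)
  rw [show ((k.toNat : Int)) = k by omega] at this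
  exact this

theorem pv_slice_nat (t : List Char) (a b : Nat) (ha : a ≤ t.length) (hb : b ≤ t.length) :
    PySem.Chars.slice t (some (a : Int)) (some (b : Int)) = (t.drop a).take (b - a) := by
  simp only [PySem.Chars.slice_eq_listSlice]
  unfold PySem.List.slice PySem.List.clampIdx
  dsimp only
  rw [if_neg (by omega : ¬ ((a : Int) < 0)), if_neg (by omega : ¬ ((b : Int) < 0))]
  simp only [Int.toNat_natCast]
  rw [min_eq_left ha, min_eq_left hb]

def pvConsHead (p : List Char) : List (List Char) → List (List Char)
  | [] => [p]
  | h :: t => (p ++ h) :: t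

theorem pv_splitOn_go_spec : ∀ (fuel : Nat) (l cur : List Char) (acc : List (List Char)),
    l.length < fuel →
    PySem.Chars.splitOn.go ['\n'] fuel l cur acc =
      acc.reverse ++ pvConsHead cur.reverse (PySem.Chars.splitOn l ['\n']) := by
  intro fuel
  induction fuel using Nat.strong_induction_on with
  | _ fuel ih =>
  intro l cur acc h
  match fuel, l with
  | f + 1, [] =>
      rw [PySem.Chars.splitOn.go]
      unfold PySem.Chars.splitOn
      rw [PySem.Chars.splitOn.go]
      · simp [pvConsHead]
      all_goals simp
  | f + 1, c :: rest =>
      rw [PySem.Chars.splitOn.go]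
      unfold PySem.Chars.splitOn
      rw [PySem.Chars.splitOn.go]
      simp only [List.length_cons] at h
      have hrest : rest.length < f := by omega
      have hinner : rest.length < rest.length + 1 := by omega
      by_cases hp : (['\n'] : List Char).isPrefixOf (c :: rest) = true
      · rw [if_pos hp, if_pos hp]
        simp only [List.length_nil, List.length_cons, List.drop_succ_cons, List.drop_zero]
        rw [ih f (by omega) rest [] (cur.reverse :: acc) hrest]
        rw [ih (rest.length + 1) (by omega) rest [] ([].reverse :: []) hinner]
        cases hsp : PySem.Chars.splitOn rest ['\n'] with
        | nil => simp [pvConsHead]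
        | cons hh tt => simp [pvConsHead]
      · rw [if_neg hp, if_neg hp]
        simp only [List.length_cons]
        rw [ih f (by omega) rest (c :: cur) acc hrest]
        rw [ih (rest.length + 1) (by omega) rest [c] [] hinner]
        simp only [List.reverse_cons, List.reverse_nil, List.nil_append]
        cases hsp : PySem.Chars.splitOn rest ['\n'] with
        | nil => simp [pvConsHead]
        | cons hh tt => simp [pvConsHead]

theorem pv_splitOn_nil : PySem.Chars.splitOn [] ['\n'] = [[]] := by
  unfold PySem.Chars.splitOn
  rw [PySem.Chars.splitOn.go]
  · simp
  all_goals simp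

theorem pv_splitOn_ne_nil (t : List Char) : PySem.Chars.splitOn t ['\n'] ≠ [] := by
  intro h
  have hs := pv_splitOn_go_spec (t.length + 1) t [] [] (by omega)
  have : PySem.Chars.splitOn t ['\n'] = pvConsHead [] (PySem.Chars.splitOn t ['\n']) := by
    conv_lhs => unfold PySem.Chars.splitOn
    simpa using hs
  rw [h] at this
  simp [pvConsHead] at this

theorem pv_splitOn_newline_cons (rest : List Char) :
    PySem.Chars.splitOn ('\n' :: rest) ['\n'] = [] :: PySem.Chars.splitOn rest ['\n'] := by
  conv_lhs => unfold PySem.Chars.splitOn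
  rw [PySem.Chars.splitOn.go]
  rw [if_pos (by simp)]
  simp only [List.length_nil, List.length_cons, List.drop_succ_cons, List.drop_zero]
  rw [pv_splitOn_go_spec (rest.length + 1) rest [] ([].reverse :: []) (by omega)]
  cases hsp : PySem.Chars.splitOn rest ['\n'] with
  | nil => exact absurd hsp (pv_splitOn_ne_nil rest)
  | cons hh tt => simp [pvConsHead]

theorem pv_splitOn_other_cons (c : Char) (rest : List Char) (hc : c ≠ '\n') :
    PySem.Chars.splitOn (c :: rest) ['\n'] = pvConsHead [c] (PySem.Chars.splitOn rest ['\n']) := by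
  conv_lhs => unfold PySem.Chars.splitOn
  rw [PySem.Chars.splitOn.go]
  rw [if_neg (by simp [List.isPrefixOf_iff_prefix, List.cons_prefix_cons]; intro h; exact absurd h.symm hc)]
  simp only [List.length_cons]
  rw [pv_splitOn_go_spec (rest.length + 1) rest [c] [] (by omega)]
  simp [pvConsHead]

theorem pv_splitOn_no_newline (t : List Char) (ht : '\n' ∉ t) :
    PySem.Chars.splitOn t ['\n'] = [t] := by
  induction t with
  | nil => exact pv_splitOn_nil
  | cons c rest ih =>
      have hc : c ≠ '\n' := fun h => ht (by simp [h])
      rw [pv_splitOn_other_cons c rest hc, ih (fun h => ht (List.mem_cons_of_mem _ h))]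
      simp [pvConsHead]

theorem pv_splitOn_append (a r : List Char) (ha : '\n' ∉ a) :
    PySem.Chars.splitOn (a ++ '\n' :: r) ['\n'] = a :: PySem.Chars.splitOn r ['\n'] := by
  induction a with
  | nil => simpa using pv_splitOn_newline_cons r
  | cons c a' ih =>
      have hc : c ≠ '\n' := fun h => ha (by simp [h])
      rw [List.cons_append, pv_splitOn_other_cons c _ hc]
      rw [ih (fun h => ha (List.mem_cons_of_mem _ h))]
      simp [pvConsHead]

def pvFirstRaw (m : List Char) : List (List Char) → Option (List Char)
  | [] => none
  | l :: ls => if PySem.Chars.isIn m (PySem.Chars.lower l) then some l else pvFirstRaw m ls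

theorem pv_split_at_newline : ∀ (t : List Char), '\n' ∈ t →
    ∃ a r, t = a ++ '\n' :: r ∧ '\n' ∉ a := by
  intro t
  induction t with
  | nil => intro h; simp at h
  | cons c t' ih =>
      intro hmem
      by_cases hc : c = '\n'
      · exact ⟨[], t', by simp [hc], by simp⟩
      · have : '\n' ∈ t' := by
          rcases List.mem_cons.mp hmem with h | h
          · exact absurd h.symm hc
          · exact h
        rcases ih this with ⟨a, r, hteq, hna⟩
        refine ⟨c :: a, r, by simp [hteq], ?_⟩
        intro h
        rcases List.mem_cons.mp h with h | h
        · exact hc h.symm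
        · exact hna h

theorem pv_lines_no_newline (t : List Char) :
    ∀ l ∈ PySem.Chars.splitOn t ['\n'], '\n' ∉ l := by
  have H : ∀ N : Nat, ∀ t : List Char, t.length ≤ N → ∀ l ∈ PySem.Chars.splitOn t ['\n'], '\n' ∉ l := by
    intro N
    induction N with
    | zero =>
        intro t ht l hl
        have : t = [] := by cases t <;> simp_all
        subst this
        rw [pv_splitOn_nil] at hl
        simp at hl
        simp [hl]
    | succ N ihN =>
        intro t ht l hl
        by_cases hmem : '\n' ∈ t
        · rcases pv_split_at_newline t hmem with ⟨a, r, rfl, ha⟩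
          rw [pv_splitOn_append a r ha] at hl
          rcases List.mem_cons.mp hl with h | h
          · subst h; exact ha
          · have hr : r.length ≤ N := by
              have := ht
              simp [List.length_append] at this
              omega
            exact ihN r hr l h
        · rw [pv_splitOn_no_newline t hmem] at hl
          simp at hl
          subst hl
          exact hmem
  exact H t.length t (le_refl _)

-- single line: the whole text, when it contains m
theorem pv_lineAt_no_newline (t : List Char) (idx : Int) (h0 : 0 ≤ idx) (hle : idx ≤ (t.length : Int))
    (ht : '\n' ∉ t) : pvLineAt t idx = t := by
  unfold pvLineAt
  rw [pv_rfindFrom_zero_some t ['\n'] idx h0 hle]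
  rw [pv_rfind_no_newline _ (fun h => ht (List.mem_of_mem_take h))]
  rw [pv_findFrom_nonneg t ['\n'] idx h0 hle]
  rw [pv_find_no_newline _ (fun h => ht (List.mem_of_mem_drop h))]
  norm_num

theorem pv_rfind_nonneg_lt (s sub : List Char) (hsub : sub ≠ [])
    (h : PySem.Chars.rfind s sub ≠ -1) :
    ∃ jn : Nat, PySem.Chars.rfind s sub = (jn : Int) ∧ jn < s.length := by
  unfold PySem.Chars.rfind at h ⊢
  rcases pv_rfind_go_spec s sub s.length with ⟨h1, _⟩ | ⟨j, hj, heq, hocc, _⟩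
  · exact absurd h1 h
  · refine ⟨j, heq, ?_⟩
    have hne : s.drop j ≠ [] := by
      intro hd
      rw [hd] at hocc
      exact hsub (List.prefix_nil.mp hocc)
    by_contra hge
    push Not at hge
    exact hne (List.drop_eq_nil_of_le hge)

theorem pv_drop_shift (a r : List Char) (i : Nat) :
    (a ++ '\n' :: r).drop (a.length + 1 + i) = r.drop i := by
  rw [List.drop_append, List.drop_eq_nil_of_le (by omega), List.nil_append]
  rw [show a.length + 1 + i - a.length = i + 1 by omega, List.drop_succ_cons]

theorem pv_take_shift (a r : List Char) (i : Nat) :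
    (a ++ '\n' :: r).take (a.length + 1 + i) = a ++ '\n' :: r.take i := by
  rw [show a.length + 1 + i = a.length + (1 + i) by omega, List.take_length_add_append]
  rw [show 1 + i = i + 1 by omega]
  rfl

theorem pv_lineAt_shift (a r : List Char) (j : Int) (h0 : 0 ≤ j) (hj : j ≤ (r.length : Int)) :
    pvLineAt (a ++ '\n' :: r) ((a.length : Int) + 1 + j) = pvLineAt r j := by
  set t := a ++ '\n' :: r with ht
  have hlen : t.length = a.length + 1 + r.length := by simp [ht]; omega
  have hK0 : 0 ≤ (a.length : Int) + 1 + j := by omega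
  have hKle : (a.length : Int) + 1 + j ≤ (t.length : Int) := by omega
  have hKtoNat : ((a.length : Int) + 1 + j).toNat = a.length + 1 + j.toNat := by omega
  unfold pvLineAt
  dsimp only
  rw [pv_rfindFrom_zero_some t ['\n'] _ hK0 hKle, pv_rfindFrom_zero_some r ['\n'] j h0 hj]
  rw [pv_findFrom_nonneg t ['\n'] _ hK0 hKle, pv_findFrom_nonneg r ['\n'] j h0 hj]
  rw [hKtoNat, pv_take_shift a r j.toNat, pv_drop_shift a r j.toNat]
  rw [pv_rfind_newline_append a (r.take j.toNat)]
  -- Nat forms of the start index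
  obtain ⟨S, hSt, hSr, hSle⟩ : ∃ S : Nat,
      ((if PySem.Chars.rfind (r.take j.toNat) ['\n'] = -1 then (a.length : Int)
        else (a.length : Int) + 1 + PySem.Chars.rfind (r.take j.toNat) ['\n']) + 1)
        = ((a.length + 1 + S : Nat) : Int) ∧
      PySem.Chars.rfind (r.take j.toNat) ['\n'] + 1 = (S : Int) ∧ S ≤ r.length := by
    by_cases hr : PySem.Chars.rfind (r.take j.toNat) ['\n'] = -1
    · refine ⟨0, ?_, by rw [hr]; norm_num, by omega⟩
      rw [if_pos hr]; push_cast; ring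
    · obtain ⟨s0, hs0, hs0lt⟩ := pv_rfind_nonneg_lt (r.take j.toNat) ['\n'] (by simp) hr
      have hlen_take : (r.take j.toNat).length ≤ r.length := by simp
      refine ⟨s0 + 1, ?_, by rw [hs0]; push_cast; ring, by omega⟩
      rw [if_neg hr, hs0]; push_cast; ring
  -- Nat forms of the stop index
  obtain ⟨E, hEt, hEr, hEle⟩ : ∃ E : Nat,
      (if (if PySem.Chars.find (r.drop j.toNat) ['\n'] = -1 then -1
           else (a.length : Int) + 1 + j + PySem.Chars.find (r.drop j.toNat) ['\n']) = -1
        then (t.length : Int)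
        else if PySem.Chars.find (r.drop j.toNat) ['\n'] = -1 then -1
          else (a.length : Int) + 1 + j + PySem.Chars.find (r.drop j.toNat) ['\n'])
        = ((a.length + 1 + E : Nat) : Int) ∧
      (if (if PySem.Chars.find (r.drop j.toNat) ['\n'] = -1 then -1
           else j + PySem.Chars.find (r.drop j.toNat) ['\n']) = -1
        then (r.length : Int)
        else if PySem.Chars.find (r.drop j.toNat) ['\n'] = -1 then -1
          else j + PySem.Chars.find (r.drop j.toNat) ['\n'])
        = (E : Int) ∧ E ≤ r.length := by
    by_cases hf : PySem.Chars.find (r.drop j.toNat) ['\n'] = -1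
    · refine ⟨r.length, ?_, ?_, le_refl _⟩
      · rw [if_pos (by rw [if_pos hf])]
        rw [hlen]
      · rw [if_pos (by rw [if_pos hf])]
    · have hf0 : 0 ≤ PySem.Chars.find (r.drop j.toNat) ['\n'] := by
        have := PySem.Chars.neg_one_le_find (s := r.drop j.toNat) (sub := ['\n'])
        omega
      have hfle := PySem.Chars.find_le_length (s := r.drop j.toNat) (sub := ['\n'])
      simp only [List.length_drop] at hfle
      refine ⟨j.toNat + (PySem.Chars.find (r.drop j.toNat) ['\n']).toNat, ?_, ?_, by omega⟩
      · rw [if_neg (by rw [if_neg hf]; omega), if_neg hf]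
        push_cast; omega
      · rw [if_neg (by rw [if_neg hf]; omega), if_neg hf]
        push_cast; omega
  rw [hEt, hEr, hSt, hSr]
  rw [pv_slice_nat t _ _ (by rw [hlen]; omega) (by rw [hlen]; omega)]
  rw [pv_slice_nat r S E hSle hEle]
  rw [ht, pv_drop_shift a r S]
  congr 1
  omega

theorem pv_lowerChar_nl : PySem.Chars.lowerChar '\n' = '\n' := by decide

theorem pv_lower_append_nl (a r : List Char) :
    PySem.Chars.lower (a ++ '\n' :: r) = PySem.Chars.lower a ++ '\n' :: PySem.Chars.lower r := by
  unfold PySem.Chars.lower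
  rw [List.map_append, List.map_cons, pv_lowerChar_nl]

theorem pv_lineAt_first (a r : List Char) (ha : '\n' ∉ a) (idx : Int)
    (h0 : 0 ≤ idx) (hle : idx ≤ (a.length : Int)) :
    pvLineAt (a ++ '\n' :: r) idx = a := by
  set t := a ++ '\n' :: r with ht
  have hlen : t.length = a.length + 1 + r.length := by simp [ht]; omega
  have hKle : idx ≤ (t.length : Int) := by omega
  unfold pvLineAt
  dsimp only
  rw [pv_rfindFrom_zero_some t ['\n'] idx h0 hKle]
  have htake : t.take idx.toNat = a.take idx.toNat := by
    rw [ht, List.take_append_of_le_length (by omega)]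
  rw [htake, pv_rfind_no_newline _ (fun h => ha (List.mem_of_mem_take h))]
  rw [pv_findFrom_nonneg t ['\n'] idx h0 hKle]
  have hdrop : t.drop idx.toNat = a.drop idx.toNat ++ '\n' :: r := by
    rw [ht, List.drop_append_of_le_length (by omega)]
  rw [hdrop, pv_find_newline_append (a.drop idx.toNat) r (fun h => ha (List.mem_of_mem_drop h))]
  have hfne : ¬ (((a.drop idx.toNat).length : Int) = -1) := by omega
  rw [if_neg hfne]
  simp only [List.length_drop]
  have hstop : idx + ((a.length - idx.toNat : Nat) : Int) = ((a.length : Nat) : Int) := by omega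
  have hstopne : ¬ (idx + ((a.length - idx.toNat : Nat) : Int) = -1) := by omega
  rw [if_neg hstopne, hstop]
  have hstart : (-1 : Int) + 1 = ((0 : Nat) : Int) := rfl
  rw [hstart, pv_slice_nat t 0 a.length (by omega) (by omega)]
  rw [List.drop_zero, Nat.sub_zero, ht, List.take_append_of_le_length (le_refl _), List.take_length]

theorem pv_main (m : List Char) (hm : '\n' ∉ m) (t : List Char) :
    pvFirstRaw m (PySem.Chars.splitOn t ['\n']) =
      (if PySem.Chars.find (PySem.Chars.lower t) m = -1 then none
       else some (pvLineAt t (PySem.Chars.find (PySem.Chars.lower t) m))) := by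
  have Hnonl : ∀ t : List Char, '\n' ∉ t →
      pvFirstRaw m (PySem.Chars.splitOn t ['\n']) =
        (if PySem.Chars.find (PySem.Chars.lower t) m = -1 then none
         else some (pvLineAt t (PySem.Chars.find (PySem.Chars.lower t) m))) := by
    intro t ht
    rw [pv_splitOn_no_newline t ht]
    unfold pvFirstRaw
    by_cases hI : PySem.Chars.isIn m (PySem.Chars.lower t) = true
    · rw [if_pos hI]
      have hne : PySem.Chars.find (PySem.Chars.lower t) m ≠ -1 := by
        rw [PySem.Chars.find_ne_neg_one_iff]
        exact (PySem.Chars.isIn_iff_infix _ _).mp hI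
      rw [if_neg hne]
      obtain ⟨h0, hlen⟩ := pv_find_nonneg_le _ _ hne
      rw [pv_lineAt_no_newline t _ h0 (by rw [← pv_length_lower t]; omega) ht]
    · rw [if_neg hI]
      have : PySem.Chars.find (PySem.Chars.lower t) m = -1 := by
        rw [PySem.Chars.find_eq_neg_one_iff]
        exact (PySem.Chars.isIn_eq_false_iff _ _).mp (by simpa using hI)
      rw [if_pos this]
      rfl
  have H : ∀ N : Nat, ∀ t : List Char, t.length ≤ N →
      pvFirstRaw m (PySem.Chars.splitOn t ['\n']) =
        (if PySem.Chars.find (PySem.Chars.lower t) m = -1 then none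
         else some (pvLineAt t (PySem.Chars.find (PySem.Chars.lower t) m))) := by
    intro N
    induction N with
    | zero =>
        intro t ht
        have : t = [] := by cases t <;> simp_all
        subst this
        exact Hnonl [] (by simp)
    | succ N ihN =>
        intro t ht
        by_cases hmem : '\n' ∈ t
        · rcases pv_split_at_newline t hmem with ⟨a, r, rfl, ha⟩
          have hr : r.length ≤ N := by
            simp [List.length_append] at ht
            omega
          rw [pv_splitOn_append a r ha, pv_lower_append_nl a r]
          unfold pvFirstRaw
          by_cases hA : PySem.Chars.isIn m (PySem.Chars.lower a) = true
          · rw [if_pos hA]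
            have hinf : m <:+: PySem.Chars.lower a := (PySem.Chars.isIn_iff_infix _ _).mp hA
            rw [pv_find_append_left m _ _ hinf]
            have hne : PySem.Chars.find (PySem.Chars.lower a) m ≠ -1 := by
              rw [PySem.Chars.find_ne_neg_one_iff]; exact hinf
            rw [if_neg hne]
            obtain ⟨h0, hlen⟩ := pv_find_nonneg_le _ _ hne
            rw [pv_lineAt_first a r ha _ h0 (by rw [← pv_length_lower a]; omega)]
          · rw [if_neg hA]
            have hninf : ¬ (m <:+: PySem.Chars.lower a) :=
              (PySem.Chars.isIn_eq_false_iff _ _).mp (by simpa using hA)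
            have hmne : m ≠ [] := by
              intro h
              subst h
              rw [PySem.Chars.isIn_nil] at hA
              exact hA rfl
            rw [pv_find_append_sep m hm hmne _ _ hninf]
            by_cases hfr : PySem.Chars.find (PySem.Chars.lower r) m = -1
            · rw [if_pos hfr]
              rw [ihN r hr, if_pos hfr]
              simp
            · rw [if_neg hfr]
              have hne2 : ¬ (((PySem.Chars.lower a).length : Int) + 1 + PySem.Chars.find (PySem.Chars.lower r) m = -1) := by
                have := PySem.Chars.neg_one_le_find (s := PySem.Chars.lower r) (sub := m)
                omega
              rw [if_neg hne2]
              rw [ihN r hr, if_neg hfr]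
              obtain ⟨h0, hlen2⟩ := pv_find_nonneg_le _ _ hfr
              have hjle : PySem.Chars.find (PySem.Chars.lower r) m ≤ (r.length : Int) := by
                rw [← pv_length_lower r]; omega
              rw [pv_length_lower a]
              rw [pv_lineAt_shift a r _ h0 hjle]
        · exact Hnonl t hmem
  exact H t.length t (le_refl _)

theorem pv_firstLine_eq_map (m : List Char) : ∀ ls : List (List Char),
    pvFirstLine m ls = (pvFirstRaw m ls).map PySem.Chars.strip := by
  intro ls
  induction ls with
  | nil => rfl
  | cons l ls ih =>
      unfold pvFirstLine pvFirstRaw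
      by_cases h : PySem.Chars.isIn m (PySem.Chars.lower l) = true
      · rw [if_pos h, if_pos h]; rfl
      · rw [if_neg h, if_neg h]; exact ih

theorem pv_firstRaw_none (m : List Char) : ∀ ls : List (List Char),
    (∀ l ∈ ls, ¬ (PySem.Chars.isIn m (PySem.Chars.lower l) = true)) →
    pvFirstRaw m ls = none := by
  intro ls
  induction ls with
  | nil => intro _; rfl
  | cons l ls ih =>
      intro h
      unfold pvFirstRaw
      rw [if_neg (h l (by simp))]
      exact ih (fun x hx => h x (by simp [hx]))

theorem pv_final (rt em : String) :
    extract_error_context_py rt em = extract_error_context_py_alt rt em := by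
  unfold extract_error_context_py extract_error_context_py_alt
  dsimp only
  by_cases hn : '\n' ∈ em.toList
  · rw [if_pos (Or.inl hn)]
    rw [pv_firstLine_eq_map, pv_firstRaw_none _ _ (by
      intro l hl
      rw [Bool.not_eq_true, PySem.Chars.isIn_eq_false_iff]
      intro hinf
      have h1 : '\n' ∈ PySem.Chars.lower em.toList := (pv_mem_lower_newline em.toList).mpr hn
      have h2 : '\n' ∈ PySem.Chars.lower l := hinf.subset h1
      exact (pv_lines_no_newline rt.toList l hl) ((pv_mem_lower_newline l).mp h2))]
    rfl
  · have hm : '\n' ∉ PySem.Chars.lower em.toList :=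
      fun h => hn ((pv_mem_lower_newline em.toList).mp h)
    rw [pv_firstLine_eq_map, pv_main _ hm rt.toList]
    by_cases hf : PySem.Chars.find (PySem.Chars.lower rt.toList) (PySem.Chars.lower em.toList) = -1
    · rw [if_pos hf, if_pos (Or.inr hf)]
      rfl
    · rw [if_neg hf, if_neg (show ¬ ('\n' ∈ em.toList ∨ PySem.Chars.find (PySem.Chars.lower rt.toList) (PySem.Chars.lower em.toList) = -1) from by
        push Not; exact ⟨hn, hf⟩)]
      dsimp only [Option.map]
      by_cases he : PySem.Chars.strip (pvLineAt rt.toList (PySem.Chars.find (PySem.Chars.lower rt.toList) (PySem.Chars.lower em.toList))) = []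
      · rw [he]
        simp
      · rw [if_neg he]
        simp [he]

-- ===== VERDICT (by name: the statement is the Claim_ definition above) =====
theorem extract_error_context_py_spec : Claim_equal_extract_error_context_py := by
  intro response_text error_match _
  unfold Spec_extract_error_context_py
  exact pv_final response_text error_match
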